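-- pv_equiv track=rewrite | github.com/Kobusg2810/Jesaia-Kobus-AMB-2810q | app.py | format_pages_as_string
-- ===== SOURCE A (Python) =====
-- def format_pages_as_string(page_list, mode):
--     """Ensures page numbers are a single flat string to prevent bullets in Excel."""
--     if not page_list:
--         return "NOT FOUND"
--
--     # Get unique, sorted integers
--     pages = sorted(list(set([int(p) for p in page_list])))
--
--     if mode == "Starting Page Only":
--         result = str(pages[0])
--     elif mode == "Show All":
--         result = ", ".join(map(str, pages))
--     else:
--         # Condensed (e.g., 4-6, 12)
--         ranges = []
--         start = pages[0]
--         for i in range(1, len(pages)):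
--             if pages[i] != pages[i-1] + 1:
--                 ranges.append(f"{start}-{pages[i-1]}" if start != pages[i-1] else f"{start}")
--                 start = pages[i]
--         ranges.append(f"{start}-{pages[-1]}" if start != pages[-1] else f"{start}")
--         result = ", ".join(ranges)
--
--     # Final safety check: replace any newline characters to prevent Excel from creating bullets
--     return str(result).replace('\n', ' ').strip()
-- ===== SOURCE B (Python) =====
-- def format_pages_as_string(page_list, mode):
--     """Ensures page numbers are a single flat string to prevent bullets in Excel."""
--     if not page_list:
--         return "NOT FOUND"
--
--     pageset = set(int(p) for p in page_list)
--     pages = sorted(pageset)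
--
--     if mode == "Starting Page Only":
--         result = str(pages[0])
--     elif mode == "Show All":
--         result = ", ".join(map(str, pages))
--     else:
--         # Boundary detection by set membership: a page starts a maximal run iff its
--         # predecessor is absent, and ends one iff its successor is absent; pairing
--         # the k-th start with the k-th end yields exactly the maximal runs.
--         starts = [x for x in pages if x - 1 not in pageset]
--         ends = [x for x in pages if x + 1 not in pageset]
--         result = ", ".join(f"{a}-{b}" if a != b else f"{a}" for a, b in zip(starts, ends))
--
--     return str(result).replace('\n', ' ').strip()
-- ===== Notes on version B (the rewrite author's own statement) =====
-- stated objective: alternative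
-- what changed: The condensed branch's stateful adjacent-comparison index loop is replaced by set-membership boundary detection: a hash set of the pages is built once, run starts are the pages whose predecessor is absent from the set, run ends those whose successor is absent, and zipping the two filtered lists gives the maximal runs directly.
import Mathlib
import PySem

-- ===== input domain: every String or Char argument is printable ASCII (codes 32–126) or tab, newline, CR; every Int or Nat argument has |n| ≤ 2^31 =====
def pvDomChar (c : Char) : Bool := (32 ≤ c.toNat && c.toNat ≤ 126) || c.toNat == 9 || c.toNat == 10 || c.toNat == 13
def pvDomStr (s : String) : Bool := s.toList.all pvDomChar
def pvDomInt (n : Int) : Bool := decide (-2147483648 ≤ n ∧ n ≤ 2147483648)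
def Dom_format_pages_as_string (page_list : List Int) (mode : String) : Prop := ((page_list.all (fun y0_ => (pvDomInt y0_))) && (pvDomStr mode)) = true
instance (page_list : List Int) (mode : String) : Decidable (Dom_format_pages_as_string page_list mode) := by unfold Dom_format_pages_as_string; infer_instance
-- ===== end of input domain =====

-- B replaces A's stateful adjacent-comparison loop in the condensed branch by set-membership
-- boundary detection: run starts are pages with x-1 absent from the page set, run ends pages
-- with x+1 absent, zipped pairwise (objective: alternative).

-- f"{a}-{b}" if a != b else f"{a}"  (this f-string appears verbatim in both Pythons)
def pvFmtRange (a b : Int) : String :=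
  if a ≠ b then PySem.Int.toStr a ++ "-" ++ PySem.Int.toStr b else PySem.Int.toStr a

-- ===== PORT A =====
def format_pages_as_string (page_list : List Int) (mode : String) : String :=
  if page_list = [] then "NOT FOUND"
  else
    let pages := PySem.List.sorted (PySem.Set.ofList page_list) (fun x => x) false
    let result :=
      if mode = "Starting Page Only" then
        PySem.Int.toStr (PySem.List.pyGetD pages 0 0)
      else if mode = "Show All" then
        PySem.Str.join ", " (pages.map PySem.Int.toStr)
      else
        -- ranges/start loop over i in range(1, len(pages))
        let st :=
          (PySem.List.pyRange 1 (PySem.List.len pages) 1).foldl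
            (fun (s : List String × Int) i =>
              if PySem.List.pyGetD pages i 0 ≠ PySem.List.pyGetD pages (i - 1) 0 + 1 then
                (s.1 ++ [pvFmtRange s.2 (PySem.List.pyGetD pages (i - 1) 0)],
                 PySem.List.pyGetD pages i 0)
              else s)
            (([] : List String), PySem.List.pyGetD pages 0 0)
        PySem.Str.join ", " (st.1 ++ [pvFmtRange st.2 (PySem.List.pyGetD pages (-1) 0)])
    PySem.Str.strip (PySem.Str.replace result "\n" " ")

-- ===== PORT B =====
-- starts/ends are the two list comprehensions filtering pages by set membership of x-1 / x+1;
-- zip pairs them positionally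
def format_pages_as_string_alt (page_list : List Int) (mode : String) : String :=
  if page_list = [] then "NOT FOUND"
  else
    let pageset := PySem.Set.ofList page_list
    let pages := PySem.List.sorted pageset (fun x => x) false
    let result :=
      if mode = "Starting Page Only" then
        PySem.Int.toStr (PySem.List.pyGetD pages 0 0)
      else if mode = "Show All" then
        PySem.Str.join ", " (pages.map PySem.Int.toStr)
      else
        let starts := pages.filter (fun x => !(PySem.Set.contains pageset (x - 1)))
        let ends := pages.filter (fun x => !(PySem.Set.contains pageset (x + 1)))
        PySem.Str.join ", " ((starts.zip ends).map (fun ab => pvFmtRange ab.1 ab.2))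
    PySem.Str.strip (PySem.Str.replace result "\n" " ")

-- ===== PRECONDITION & SPEC =====
def Spec_format_pages_as_string (page_list : List Int) (mode : String) (out : String) : Prop := out = format_pages_as_string_alt page_list mode
instance (page_list : List Int) (mode : String) (out : String) : Decidable (Spec_format_pages_as_string page_list mode out) := by unfold Spec_format_pages_as_string; infer_instance

-- ===== CLAIM (what is proved, stated in full; the proofs are below) =====
def Claim_equal_format_pages_as_string : Prop := ∀ (page_list : List Int) (mode : String), Dom_format_pages_as_string page_list mode → Spec_format_pages_as_string page_list mode (format_pages_as_string page_list mode)

-- ===== LEMMAS AND PROOFS =====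

-- the loop body of A's condensed branch, named
def pvStep (pages : List Int) (s : List String × Int) (i : Int) : List String × Int :=
  if PySem.List.pyGetD pages i 0 ≠ PySem.List.pyGetD pages (i - 1) 0 + 1 then
    (s.1 ++ [pvFmtRange s.2 (PySem.List.pyGetD pages (i - 1) 0)], PySem.List.pyGetD pages i 0)
  else s

-- A's loop re-expressed as a walk carrying the previous element
def pvGo (prev : Int) (xs : List Int) (s : List String × Int) : List String × Int :=
  match xs with
  | [] => s
  | y :: ys => pvGo y ys (if y ≠ prev + 1 then (s.1 ++ [pvFmtRange s.2 prev], y) else s)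

-- the maximal consecutive runs of start :: prev-continued-by xs, as (first, last) pairs
def pvRuns (start prev : Int) : List Int → List (Int × Int)
  | [] => [(start, prev)]
  | y :: ys => if y = prev + 1 then pvRuns start y ys else (start, prev) :: pvRuns y y ys

-- run starts strictly after the head, by adjacent comparison (proof-side mirror of B's filter)
def pvSTail (prev : Int) : List Int → List Int
  | [] => []
  | y :: ys => if y = prev + 1 then pvSTail y ys else y :: pvSTail y ys

-- run ends of prev :: xs, by adjacent comparison (proof-side mirror of B's filter)
def pvEnds (prev : Int) : List Int → List Int
  | [] => [prev]
  | y :: ys => if y = prev + 1 then pvEnds y ys else prev :: pvEnds y ys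

theorem pvGetD_neg_one_cons (h : Int) (t : List Int) :
    PySem.List.pyGetD (h :: t) (-1) 0 = (h :: t).getLastD 0 := by
  have hne : (h :: t) ≠ [] := by simp
  rw [PySem.List.pyGetD_neg_one (h :: t) 0 hne]
  simp [List.getLastD_eq_getLast?, List.getLast?_eq_some_getLast hne]

theorem pvFold_eq_go (pages : List Int) :
    ∀ (m k : Nat) (s : List String × Int), pages.length - (k + 1) = m → k < pages.length →
    (PySem.List.pyRange ((k : Int) + 1) (pages.length : Int) 1).foldl (pvStep pages) s
      = pvGo (pages.getD k 0) (pages.drop (k + 1)) s := by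
  intro m
  induction m with
  | zero =>
    intro k s hm hk
    rw [PySem.List.pyRange_one_eq_nil (by omega), List.drop_eq_nil_of_le (by omega)]
    simp [pvGo]
  | succ m ih =>
    intro k s hm hk
    have hk1 : k + 1 < pages.length := by omega
    have hgd : pages.getD (k + 1) 0 = pages[k + 1]'hk1 := List.getD_eq_getElem _ _ hk1
    have hlt : ((k : Int) + 1) < (pages.length : Int) := by exact_mod_cast hk1
    rw [PySem.List.pyRange_one_cons hlt, List.foldl_cons]
    have e2 : ((k : Int) + 1 - 1) = ((k : Nat) : Int) := by ring
    have e1 : ((k : Int) + 1) = ((k + 1 : Nat) : Int) := by push_cast; ring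
    have hstep : pvStep pages s ((k : Int) + 1)
        = if pages[k + 1]'hk1 ≠ pages.getD k 0 + 1
          then (s.1 ++ [pvFmtRange s.2 (pages.getD k 0)], pages[k + 1]'hk1) else s := by
      simp only [pvStep]
      rw [e2, e1]
      simp only [PySem.List.pyGetD_natCast, hgd]
    have ecast : ((k : Int) + 1 + 1) = (((k + 1 : Nat)) : Int) + 1 := by push_cast; ring
    rw [ecast, ih (k + 1) (pvStep pages s ((k : Int) + 1)) (by omega) hk1]
    rw [List.drop_eq_getElem_cons hk1]
    simp only [pvGo]
    rw [hgd, hstep]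

-- A's walk emits exactly the formatted runs
theorem pvGo_runs : ∀ (xs : List Int) (prev start : Int) (acc : List String),
    (pvGo prev xs (acc, start)).1
      ++ [pvFmtRange (pvGo prev xs (acc, start)).2 ((prev :: xs).getLastD 0)]
      = acc ++ (pvRuns start prev xs).map (fun ab => pvFmtRange ab.1 ab.2) := by
  intro xs
  induction xs with
  | nil => intro prev start acc; simp [pvGo, pvRuns]
  | cons y ys ih =>
    intro prev start acc
    by_cases h : y = prev + 1
    · have hcond : ¬ (y ≠ prev + 1) := by simpa using h
      simp only [pvGo, if_neg hcond, pvRuns, if_pos h]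
      simpa [List.getLastD] using ih y start acc
    · simp only [pvGo, if_pos h, pvRuns, if_neg h]
      have := ih y y (acc ++ [pvFmtRange start prev])
      rw [show (prev :: y :: ys).getLastD 0 = (y :: ys).getLastD 0 by simp [List.getLastD]]
      simpa [List.getLastD] using this

theorem pvRuns_map_fst : ∀ (xs : List Int) (start prev : Int),
    (pvRuns start prev xs).map Prod.fst = start :: pvSTail prev xs := by
  intro xs
  induction xs with
  | nil => intro start prev; simp [pvRuns, pvSTail]
  | cons y ys ih =>
    intro start prev
    by_cases h : y = prev + 1
    · simp only [pvRuns, pvSTail, if_pos h]; exact ih start y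
    · simp only [pvRuns, pvSTail, if_neg h, List.map_cons]
      rw [ih y y]

theorem pvRuns_map_snd : ∀ (xs : List Int) (start prev : Int),
    (pvRuns start prev xs).map Prod.snd = pvEnds prev xs := by
  intro xs
  induction xs with
  | nil => intro start prev; simp [pvRuns, pvEnds]
  | cons y ys ih =>
    intro start prev
    by_cases h : y = prev + 1
    · simp only [pvRuns, pvEnds, if_pos h]; exact ih start y
    · simp only [pvRuns, pvEnds, if_neg h, List.map_cons]
      rw [ih y y]

-- B's starts filter on a strictly increasing list, tail part
theorem pvFilter_starts_tail : ∀ (xs : List Int) (prev : Int),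
    (prev :: xs).Pairwise (· < ·) →
    xs.filter (fun z => decide (z - 1 ∉ prev :: xs)) = pvSTail prev xs := by
  intro xs
  induction xs with
  | nil => intro prev _; rfl
  | cons y ys ih =>
    intro prev hp
    have hprevy : prev < y := (List.pairwise_cons.1 hp).1 y List.mem_cons_self
    have hys : ∀ z ∈ ys, y < z := by
      intro z hz
      exact ((List.pairwise_cons.1 (List.pairwise_cons.1 hp).2).1) z hz
    have hy1 : (y - 1 ∈ prev :: y :: ys) ↔ y = prev + 1 := by
      constructor
      · intro hmem
        rcases List.mem_cons.1 hmem with h | hmem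
        · omega
        rcases List.mem_cons.1 hmem with h | hmem
        · omega
        · have := hys _ hmem; omega
      · intro h
        have he : y - 1 = prev := by omega
        rw [he]; exact List.mem_cons_self
    have hcongr : ys.filter (fun z => decide (z - 1 ∉ prev :: y :: ys))
        = ys.filter (fun z => decide (z - 1 ∉ y :: ys)) := by
      apply List.filter_congr
      intro z hz
      have hyz := hys z hz
      have hiff : (z - 1 ∈ prev :: y :: ys) ↔ (z - 1 ∈ y :: ys) := by
        constructor
        · intro hm
          rcases List.mem_cons.1 hm with h | hm
          · omega
          · exact hm
        · intro hm; exact List.mem_cons_of_mem _ hm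
      simp [hiff]
    have hptail : (y :: ys).Pairwise (· < ·) := (List.pairwise_cons.1 hp).2
    by_cases h : y = prev + 1
    · rw [List.filter_cons_of_neg (by simp [hy1.2 h])]
      rw [hcongr, ih y hptail]
      simp [pvSTail, h]
    · rw [List.filter_cons_of_pos (by simp [hy1, h])]
      rw [hcongr, ih y hptail]
      simp [pvSTail, h]

-- B's ends filter on a strictly increasing list
theorem pvFilter_ends : ∀ (xs : List Int) (prev : Int),
    (prev :: xs).Pairwise (· < ·) →
    (prev :: xs).filter (fun z => decide (z + 1 ∉ prev :: xs)) = pvEnds prev xs := by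
  intro xs
  induction xs with
  | nil =>
    intro prev _
    simp only [List.filter_cons, List.filter_nil]
    rw [show (decide (prev + 1 ∉ [prev])) = true by simp]
    rfl
  | cons y ys ih =>
    intro prev hp
    have hprevy : prev < y := (List.pairwise_cons.1 hp).1 y List.mem_cons_self
    have hys : ∀ z ∈ ys, y < z := by
      intro z hz
      exact ((List.pairwise_cons.1 (List.pairwise_cons.1 hp).2).1) z hz
    have hptail : (y :: ys).Pairwise (· < ·) := (List.pairwise_cons.1 hp).2
    have hhead : (prev + 1 ∈ prev :: y :: ys) ↔ y = prev + 1 := by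
      constructor
      · intro hm
        rcases List.mem_cons.1 hm with h | hm
        · omega
        · rcases List.mem_cons.1 hm with h | hm
          · omega
          · have := hys _ hm; omega
      · intro h; rw [h]; exact List.mem_cons_of_mem _ List.mem_cons_self
    have hcongr : (y :: ys).filter (fun z => decide (z + 1 ∉ prev :: y :: ys))
        = (y :: ys).filter (fun z => decide (z + 1 ∉ y :: ys)) := by
      apply List.filter_congr
      intro z hz
      have hyz : y ≤ z := by
        rcases List.mem_cons.1 hz with h | hz
        · omega
        · have := hys z hz; omega
      have : (z + 1 ∈ prev :: y :: ys) ↔ (z + 1 ∈ y :: ys) := by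
        constructor
        · intro hm
          rcases List.mem_cons.1 hm with h | hm
          · omega
          · exact hm
        · intro hm; exact List.mem_cons_of_mem _ hm
      simp [this]
    by_cases h : y = prev + 1
    · rw [List.filter_cons_of_neg (by simp [hhead.2 h])]
      rw [hcongr, ih y hptail]
      simp [pvEnds, h]
    · rw [List.filter_cons_of_pos (by simp [hhead, h])]
      rw [hcongr, ih y hptail]
      simp [pvEnds, h]

-- pages = sorted(set(page_list)) is nonempty when page_list is
theorem pvPages_ne_nil (page_list : List Int) (h : page_list ≠ []) :
    PySem.List.sorted (PySem.Set.ofList page_list) (fun x => x) false ≠ [] := by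
  intro hnil
  rcases page_list with _ | ⟨x, xs⟩
  · exact h rfl
  · have hx : x ∈ PySem.Set.ofList (x :: xs) := by
      rw [PySem.Set.mem_ofList]; exact List.mem_cons_self
    have := (PySem.List.mem_sorted (PySem.Set.ofList (x :: xs)) (fun y => y) false x).2 hx
    rw [hnil] at this
    exact absurd this (List.not_mem_nil)

-- the port's set-membership predicates, rewritten as membership in pages itself
theorem pvFilter_pred (page_list : List Int) (d : Int) :
    (PySem.List.sorted (PySem.Set.ofList page_list) (fun x => x) false).filter
        (fun x => !(PySem.Set.contains (PySem.Set.ofList page_list) (x + d)))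
      = (PySem.List.sorted (PySem.Set.ofList page_list) (fun x => x) false).filter
        (fun z => decide (z + d ∉ PySem.List.sorted (PySem.Set.ofList page_list) (fun x => x) false)) := by
  apply List.filter_congr
  intro z _
  have h1 : (z + d ∈ PySem.Set.ofList page_list)
      ↔ (z + d ∈ PySem.List.sorted (PySem.Set.ofList page_list) (fun x => x) false) :=
    (PySem.List.mem_sorted _ _ _ _).symm
  by_cases hm : z + d ∈ PySem.Set.ofList page_list
  · rw [(PySem.Set.contains_iff _ _).2 hm]
    simp only [Bool.not_true]
    symm
    rw [decide_eq_false_iff_not]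
    exact not_not_intro (h1.1 hm)
  · have hc : PySem.Set.contains (PySem.Set.ofList page_list) (z + d) = false := by
      rw [Bool.eq_false_iff]
      intro hx
      exact hm ((PySem.Set.contains_iff _ _).1 hx)
    rw [hc]
    simp only [Bool.not_false]
    symm
    rw [decide_eq_true_eq]
    exact fun hmem => hm (h1.2 hmem)

-- ===== VERDICT (by name: the statement is the Claim_ definition above) =====
theorem format_pages_as_string_spec : Claim_equal_format_pages_as_string := by
  intro page_list mode _
  unfold Spec_format_pages_as_string format_pages_as_string format_pages_as_string_alt
  by_cases hpl : page_list = []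
  · simp [hpl]
  · simp only [if_neg hpl]
    set pages := PySem.List.sorted (PySem.Set.ofList page_list) (fun x => x) false with hpages
    have hne : pages ≠ [] := pvPages_ne_nil page_list hpl
    by_cases h1 : mode = "Starting Page Only"
    · simp [h1]
    by_cases h2 : mode = "Show All"
    · simp [h2]
    simp only [if_neg h1, if_neg h2]
    congr 2
    have hpw : pages.Pairwise (· < ·) := by
      rw [hpages]; exact PySem.List.sorted_ofList_pairwise_lt page_list
    -- rewrite B's filters as adjacent-comparison lists
    have hS := pvFilter_pred page_list (-1)
    have hE := pvFilter_pred page_list 1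
    rw [← hpages] at hS hE
    rcases hp : pages with _ | ⟨p, ps⟩
    · exact absurd hp hne
    rw [hp] at hpw hS hE
    -- A side: fold = pvGo = formatted pvRuns
    have hfold :
        (PySem.List.pyRange 1 (PySem.List.len (p :: ps)) 1).foldl (pvStep (p :: ps))
            (([] : List String), PySem.List.pyGetD (p :: ps) 0 0)
          = pvGo p ps (([] : List String), p) := by
      have h0 : (0 : Nat) < (p :: ps).length := by simp
      have := pvFold_eq_go (p :: ps) ((p :: ps).length - 1) 0
        (([] : List String), PySem.List.pyGetD (p :: ps) 0 0) (by omega) h0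
      simpa [PySem.List.len, PySem.List.pyGetD_zero_cons] using this
    rw [show
        (fun (s : List String × Int) i =>
          if PySem.List.pyGetD (p :: ps) i 0 ≠ PySem.List.pyGetD (p :: ps) (i - 1) 0 + 1 then
            (s.1 ++ [pvFmtRange s.2 (PySem.List.pyGetD (p :: ps) (i - 1) 0)],
             PySem.List.pyGetD (p :: ps) i 0)
          else s) = pvStep (p :: ps) from rfl]
    rw [hfold, pvGetD_neg_one_cons, pvGo_runs ps p p []]
    -- B side: filters = starts/ends = fst/snd of pvRuns, zip reassembles pvRuns
    have hS' : (p :: ps).filter (fun x => !(PySem.Set.contains (PySem.Set.ofList page_list) (x - 1)))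
        = (pvRuns p p ps).map Prod.fst := by
      rw [show (fun x => !(PySem.Set.contains (PySem.Set.ofList page_list) (x - 1)))
            = (fun x => !(PySem.Set.contains (PySem.Set.ofList page_list) (x + (-1)))) by
          funext x; rw [show x - 1 = x + (-1) by ring]]
      rw [hS, pvRuns_map_fst]
      have : (p :: ps).filter (fun z => decide (z + (-1) ∉ p :: ps))
          = (p :: ps).filter (fun z => decide (z - 1 ∉ p :: ps)) := by
        apply List.filter_congr; intro z _
        rw [show z + (-1) = z - 1 by ring]
      rw [this, List.filter_cons_of_pos]
      · congr 1
        exact pvFilter_starts_tail ps p hpw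
      · have : p - 1 ∉ p :: ps := by
          intro hm
          rcases List.mem_cons.1 hm with h | hm
          · omega
          · have := (List.pairwise_cons.1 hpw).1 _ hm; omega
        simp [this]
    have hE' : (p :: ps).filter (fun x => !(PySem.Set.contains (PySem.Set.ofList page_list) (x + 1)))
        = (pvRuns p p ps).map Prod.snd := by
      rw [hE, pvRuns_map_snd]
      exact pvFilter_ends ps p hpw
    rw [hS', hE', List.zip_map', List.map_map]
    rfl
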